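-- pv_equiv track=rewrite | github.com/TowerChair/Proyecto2 | QMC1.py | valores_mints
-- ===== SOURCE A (Python) =====
-- def eliminar_repetidos(lis):
-- 	temporal=[]
-- 	for i in range(0,len(lis)):
-- 		cont=0
-- 		for j in range(0,len(temporal)):
-- 			if temporal[j]==lis[i]:
-- 				cont=cont+1
-- 		if cont==0:
-- 			temporal.append(lis[i])
-- 	return temporal
--
-- def eliminar_dcs(lista,dcs):
-- 	t=len(lista)
-- 	cont=0
-- 	milist=[]
-- 	for i in range(0,t):
-- 		cont=0
-- 		for j in range(0,len(dcs)):
-- 			if lista[i]==dcs[j]: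
-- 				cont=cont+1
-- 		if cont==0:
-- 			milist.append(lista[i])
--
-- 	return milist
--
-- def valores_mints(vals,dcs):
-- 	tam=len(vals)
-- 	mis_valores=[]
-- 	for i in range(0,tam):
-- 		long=len(vals[i])
-- 		for j in range(0,long):
-- 			mis_valores.append(vals[i][j])
-- 	mis_valores2=eliminar_repetidos(mis_valores)
-- 	numeros_sin_dc=eliminar_dcs(mis_valores2,dcs)
-- 	return numeros_sin_dc
-- ===== SOURCE B (Python) =====
-- def valores_mints(vals, dcs):
--     seen = []
--     result = []
--     for sub in vals:
--         for x in sub: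
--             if x in seen:
--                 continue
--             seen.append(x)
--             if x not in dcs:
--                 result.append(x)
--     return result
-- ===== Notes on version B (the rewrite author's own statement) =====
-- stated objective: simpler
-- what changed: Fuses A's three passes (flatten loop, count-based dedup helper, count-based don't-care removal helper) into one traversal keeping a 'seen' list and appending each new non-dc element directly, skipping duplicates early instead of counting all occurrences.
import Mathlib
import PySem

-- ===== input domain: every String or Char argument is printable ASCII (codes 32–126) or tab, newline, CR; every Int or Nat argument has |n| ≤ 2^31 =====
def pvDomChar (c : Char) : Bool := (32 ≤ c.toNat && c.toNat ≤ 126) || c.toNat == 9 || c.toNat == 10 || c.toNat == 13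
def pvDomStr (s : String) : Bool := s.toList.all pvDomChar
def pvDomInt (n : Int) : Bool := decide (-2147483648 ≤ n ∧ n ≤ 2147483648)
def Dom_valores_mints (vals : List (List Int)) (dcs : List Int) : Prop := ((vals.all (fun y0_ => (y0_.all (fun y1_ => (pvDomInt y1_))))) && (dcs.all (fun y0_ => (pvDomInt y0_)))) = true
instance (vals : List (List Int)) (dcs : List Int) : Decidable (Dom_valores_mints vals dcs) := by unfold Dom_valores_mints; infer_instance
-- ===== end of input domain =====

-- B fuses A's three passes (flatten, count-based dedup, count-based dc-removal) into one
-- traversal with a 'seen' list; objective: simpler. Proved equal on all inputs.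

-- ===== PORT A =====
-- helper eliminar_repetidos: for each element, count its occurrences in temporal; append if count is 0
def eliminar_repetidos (lis : List Int) : List Int :=
  lis.foldl (fun temporal x =>
    let cont : Int := temporal.foldl (fun c y => if y == x then c + 1 else c) 0
    if cont = 0 then temporal ++ [x] else temporal) []

-- helper eliminar_dcs: for each element, count its occurrences in dcs; append if count is 0
def eliminar_dcs (lista : List Int) (dcs : List Int) : List Int :=
  lista.foldl (fun milist x =>
    let cont : Int := dcs.foldl (fun c y => if x == y then c + 1 else c) 0
    if cont = 0 then milist ++ [x] else milist) []

def valores_mints (vals : List (List Int)) (dcs : List Int) : List Int :=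
  let mis_valores := vals.foldl (fun acc sub => sub.foldl (fun a x => a ++ [x]) acc) []
  let mis_valores2 := eliminar_repetidos mis_valores
  eliminar_dcs mis_valores2 dcs

-- ===== PORT B =====
-- single fused pass: state = (seen, result)
def bstep (dcs : List Int) (st : List Int × List Int) (x : Int) : List Int × List Int :=
  if st.1.contains x then st
  else (st.1 ++ [x], if dcs.contains x then st.2 else st.2 ++ [x])

def valores_mints_alt (vals : List (List Int)) (dcs : List Int) : List Int :=
  (vals.foldl (fun st sub => sub.foldl (bstep dcs) st) ([], [])).2

-- ===== PRECONDITION & SPEC =====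
def Spec_valores_mints (vals : List (List Int)) (dcs : List Int) (out : List Int) : Prop := out = valores_mints_alt vals dcs
instance (vals : List (List Int)) (dcs : List Int) (out : List Int) : Decidable (Spec_valores_mints vals dcs out) := by unfold Spec_valores_mints; infer_instance

-- ===== CLAIM (what is proved, stated in full; the proofs are below) =====
def Claim_equal_valores_mints : Prop := ∀ (vals : List (List Int)) (dcs : List Int), Dom_valores_mints vals dcs → Spec_valores_mints vals dcs (valores_mints vals dcs)

-- ===== LEMMAS AND PROOFS =====

-- canonical dedup step both sides are reduced to
def dstep (t : List Int) (x : Int) : List Int := if t.contains x then t else t ++ [x]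

-- the filter both sides are reduced to
def keep (dcs : List Int) (x : Int) : Bool := !(dcs.contains x)

theorem eliminar_repetidos_eq (lis : List Int) :
    eliminar_repetidos lis = lis.foldl dstep [] := by
  unfold eliminar_repetidos
  refine PySem.List.foldl_congr_mem lis _ _ [] ?_
  intro acc x _
  rw [PySem.List.foldl_count_if (fun y => y == x) acc 0]
  by_cases h : acc.contains x
  · have hx : x ∈ acc := by simpa using h
    have hc : acc.countP (fun y => y == x) ≠ 0 := fun h0 => by
      have := List.countP_eq_zero.mp h0 x hx; simp at this
    simp [dstep, hc, hx]
  · have hx : x ∉ acc := by simpa using h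
    have hc : acc.countP (fun y => y == x) = 0 :=
      List.countP_eq_zero.mpr (fun a ha => by
        simp only [beq_iff_eq]; rintro rfl; exact hx ha)
    simp [dstep, hc, hx]

theorem eliminar_dcs_eq (lista dcs : List Int) :
    eliminar_dcs lista dcs = lista.filter (keep dcs) := by
  unfold eliminar_dcs
  have h1 : lista.foldl
      (fun milist x =>
        let cont : Int := dcs.foldl (fun c y => if x == y then c + 1 else c) 0
        if cont = 0 then milist ++ [x] else milist) [] =
      lista.foldl (fun milist x => if keep dcs x = true then milist ++ [x] else milist) [] := by
    refine PySem.List.foldl_congr_mem lista _ _ [] ?_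
    intro acc x _
    rw [PySem.List.foldl_count_if (fun y => x == y) dcs 0]
    by_cases h : dcs.contains x
    · have hx : x ∈ dcs := by simpa using h
      have hc : dcs.countP (fun y => x == y) ≠ 0 := fun h0 => by
        have := List.countP_eq_zero.mp h0 x hx; simp at this
      simp [keep, hc, hx]
    · have hx : x ∉ dcs := by simpa using h
      have hc : dcs.countP (fun y => x == y) = 0 :=
        List.countP_eq_zero.mpr (fun a ha => by
          simp only [beq_iff_eq]; rintro rfl; exact hx ha)
      simp [keep, hc, hx]
  rw [h1]
  simpa using PySem.List.foldl_append_if (keep dcs) (fun x => x) lista []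

theorem flatten_fold (vals : List (List Int)) :
    vals.foldl (fun acc sub => sub.foldl (fun a x => a ++ [x]) acc) [] = vals.flatten := by
  rw [← List.foldl_flatten]
  simpa using PySem.List.foldl_append_singleton vals.flatten []

theorem bstep_invariant (dcs : List Int) (l : List Int) :
    ∀ seen : List Int,
      l.foldl (bstep dcs) (seen, seen.filter (keep dcs)) =
        (l.foldl dstep seen, (l.foldl dstep seen).filter (keep dcs)) := by
  induction l with
  | nil => intro seen; simp
  | cons x l ih =>
    intro seen
    by_cases h : seen.contains x
    · simp only [List.foldl_cons, bstep, dstep, h, if_true]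
      exact ih seen
    · have hstep : bstep dcs (seen, seen.filter (keep dcs)) x =
          (seen ++ [x], (seen ++ [x]).filter (keep dcs)) := by
        have hx : x ∉ seen := by simpa using h
        by_cases hd : dcs.contains x
        · have hm : x ∈ dcs := by simpa using hd
          simp [bstep, hx, hm, List.filter_append, keep]
        · have hm : x ∉ dcs := by simpa using hd
          simp [bstep, hx, hm, List.filter_append, keep]
      simp only [List.foldl_cons, hstep, dstep, h]
      exact ih (seen ++ [x])

-- ===== VERDICT (by name: the statement is the Claim_ definition above) =====
theorem valores_mints_spec : Claim_equal_valores_mints := by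
  intro vals dcs _
  unfold Spec_valores_mints valores_mints_alt
  show eliminar_dcs (eliminar_repetidos
      (vals.foldl (fun acc sub => sub.foldl (fun a x => a ++ [x]) acc) [])) dcs
    = (vals.foldl (fun st sub => sub.foldl (bstep dcs) st) ([], [])).2
  rw [flatten_fold, eliminar_repetidos_eq, eliminar_dcs_eq, ← List.foldl_flatten]
  have h := bstep_invariant dcs vals.flatten []
  simp only [List.filter_nil] at h
  rw [h]
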